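-- pv_equiv track=rewrite | github.com/aam-berg/allelic_analyses | scripts/lib/split_by_allele.py | merge_fragment_snp_evidence
-- ===== SOURCE A (Python) =====
-- def merge_fragment_snp_evidence(hits1, hits2):
--     """
--     For paired-end mode, combine per-read SNP evidence from two mates into
--     fragment-level evidence.
--
--     If both mates cover the same SNP:
--       - Same allele on both reads -> count as one informative observation.
--       - Different alleles on the two reads (rare; sequencing error or
--         recombination) -> mark as 'other'.
--     If only one mate covers a SNP -> use that mate's call.
--
--     Returns a list of (pos, ref, alt, observed_base_or_token, assignment)
--     tuples representing the FRAGMENT'S evidence at each unique SNP. The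
--     "observed_base_or_token" is the consensus base if both mates agree, or
--     the literal string "CONFLICT" if they disagree.
--     """
--     by_pos = {}  # pos -> list of (pos, ref, alt, base, assignment)
--     for h in hits1 + hits2:
--         by_pos.setdefault(h[0], []).append(h)
--
--     merged = []
--     for pos, evidence_list in by_pos.items():
--         if len(evidence_list) == 1:
--             merged.append(evidence_list[0])
--         else:
--             # Both mates covered this SNP. Check agreement on assignment.
--             assignments = {e[4] for e in evidence_list}
--             ref, alt = evidence_list[0][1], evidence_list[0][2]
--             if len(assignments) == 1:
--                 # Consistent: keep one entry.
--                 a = assignments.pop()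
--                 base = evidence_list[0][3]
--                 merged.append((pos, ref, alt, base, a))
--             else:
--                 # Inconsistent: mark as 'other'.
--                 merged.append((pos, ref, alt, "CONFLICT", "other"))
--     return merged
-- ===== SOURCE B (Python) =====
-- def merge_fragment_snp_evidence(hits1, hits2):
--     # Single streaming pass: keep per position the first hit plus a sticky
--     # conflict flag, then emit fragment calls in first-seen order.
--     frag = {}  # pos -> (first_hit, conflict)
--     for h in hits1 + hits2:
--         pos = h[0]
--         if pos not in frag:
--             frag[pos] = (h, False)
--         else:
--             first, conflict = frag[pos]
--             if not conflict and h[4] != first[4]: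
--                 frag[pos] = (first, True)
--     out = []
--     for first, conflict in frag.values():
--         if conflict:
--             out.append((first[0], first[1], first[2], "CONFLICT", "other"))
--         else:
--             out.append(first)
--     return out
-- ===== Notes on version B (the rewrite author's own statement) =====
-- stated objective: simpler
-- what changed: Replaced A's two-phase group-then-reduce (dict from pos to the full list of hits, then a second loop building a set of assignments per position) with a single streaming pass keeping only (first hit, sticky conflict flag) per position and a direct emit in insertion order.
import Mathlib
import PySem

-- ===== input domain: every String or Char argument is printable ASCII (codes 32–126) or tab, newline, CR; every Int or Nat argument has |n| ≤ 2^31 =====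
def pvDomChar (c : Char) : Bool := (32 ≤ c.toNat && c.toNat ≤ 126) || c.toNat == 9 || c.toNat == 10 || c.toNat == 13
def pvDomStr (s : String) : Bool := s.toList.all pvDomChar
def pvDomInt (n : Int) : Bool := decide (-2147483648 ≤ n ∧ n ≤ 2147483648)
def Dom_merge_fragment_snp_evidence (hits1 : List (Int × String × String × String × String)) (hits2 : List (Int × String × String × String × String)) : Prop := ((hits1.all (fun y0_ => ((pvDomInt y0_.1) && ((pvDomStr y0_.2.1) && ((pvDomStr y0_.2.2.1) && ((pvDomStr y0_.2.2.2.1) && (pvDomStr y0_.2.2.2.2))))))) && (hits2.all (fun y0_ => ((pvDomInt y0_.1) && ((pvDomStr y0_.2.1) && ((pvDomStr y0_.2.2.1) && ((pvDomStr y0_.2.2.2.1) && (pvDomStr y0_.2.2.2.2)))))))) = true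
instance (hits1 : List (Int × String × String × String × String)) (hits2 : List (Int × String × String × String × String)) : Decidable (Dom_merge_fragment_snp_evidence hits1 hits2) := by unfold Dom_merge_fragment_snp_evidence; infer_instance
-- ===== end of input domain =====

-- B replaces A's group-all-hits-then-reduce (dict of lists + set of assignments) by one
-- streaming pass keeping only (first hit, sticky conflict flag) per position; objective: simpler.

abbrev pvHit : Type := Int × String × String × String × String

-- ===== PORT A =====
-- by_pos.setdefault(h[0], []).append(h): net effect is by_pos[h[0]] = by_pos.get(h[0], []) + [h]
def pvStepA (d : PySem.Dict Int (List pvHit)) (h : pvHit) : PySem.Dict Int (List pvHit) :=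
  d.insert h.1 (d.getD h.1 [] ++ [h])

-- loop body of 'for pos, evidence_list in by_pos.items()'; evidence_list is never empty
-- (every stored list ends in an append), so evidence_list[0] is ported as .headI and the
-- .pop() of the singleton assignment set as .headI of that set.
def pvMergeA (merged : List pvHit) (p : Int × List pvHit) : List pvHit :=
  let pos := p.1
  let el := p.2
  if el.length == 1 then merged ++ [el.headI]
  else
    let assignments : PySem.Set String := PySem.Set.ofList (el.map (fun e => e.2.2.2.2))
    let ref := el.headI.2.1
    let alt := el.headI.2.2.1
    if assignments.length == 1 then
      merged ++ [(pos, ref, alt, el.headI.2.2.2.1, assignments.headI)]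
    else
      merged ++ [(pos, ref, alt, "CONFLICT", "other")]

def merge_fragment_snp_evidence (hits1 : List (Int × String × String × String × String)) (hits2 : List (Int × String × String × String × String)) : List (Int × String × String × String × String) :=
  let by_pos := (hits1 ++ hits2).foldl pvStepA PySem.Dict.empty
  by_pos.items.foldl pvMergeA []

-- ===== PORT B =====
def pvStepB (d : PySem.Dict Int (pvHit × Bool)) (h : pvHit) : PySem.Dict Int (pvHit × Bool) :=
  match d.get? h.1 with
  | none => d.insert h.1 (h, false)
  | some fc =>
      if !fc.2 && (h.2.2.2.2 != fc.1.2.2.2.2) then d.insert h.1 (fc.1, true) else d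

def pvEmitB (out : List pvHit) (fc : pvHit × Bool) : List pvHit :=
  if fc.2 then out ++ [(fc.1.1, fc.1.2.1, fc.1.2.2.1, "CONFLICT", "other")]
  else out ++ [fc.1]

def merge_fragment_snp_evidence_alt (hits1 : List (Int × String × String × String × String)) (hits2 : List (Int × String × String × String × String)) : List (Int × String × String × String × String) :=
  let frag := (hits1 ++ hits2).foldl pvStepB PySem.Dict.empty
  frag.values.foldl pvEmitB []

-- ===== PRECONDITION & SPEC =====
def Spec_merge_fragment_snp_evidence (hits1 : List (Int × String × String × String × String)) (hits2 : List (Int × String × String × String × String)) (out : List (Int × String × String × String × String)) : Prop := out = merge_fragment_snp_evidence_alt hits1 hits2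
instance (hits1 : List (Int × String × String × String × String)) (hits2 : List (Int × String × String × String × String)) (out : List (Int × String × String × String × String)) : Decidable (Spec_merge_fragment_snp_evidence hits1 hits2 out) := by unfold Spec_merge_fragment_snp_evidence; infer_instance

-- ===== CLAIM (what is proved, stated in full; the proofs are below) =====
def Claim_equal_merge_fragment_snp_evidence : Prop := ∀ (hits1 : List (Int × String × String × String × String)) (hits2 : List (Int × String × String × String × String)), Dom_merge_fragment_snp_evidence hits1 hits2 → Spec_merge_fragment_snp_evidence hits1 hits2 (merge_fragment_snp_evidence hits1 hits2)

-- ===== LEMMAS AND PROOFS =====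

-- comparing a grouped evidence list (A's dict value) with B's (first hit, conflict flag)
def pvRel (l : List pvHit) : pvHit × Bool :=
  (l.headI, l.any (fun e => e.2.2.2.2 != l.headI.2.2.2.2))

-- the invariant tying A's dict to B's dict after the same prefix of hits
def pvInv (dA : PySem.Dict Int (List pvHit)) (dB : PySem.Dict Int (pvHit × Bool)) : Prop :=
  dA.keys.Nodup ∧ (∀ p ∈ dA.items, p.2 ≠ [] ∧ p.2.headI.1 = p.1) ∧
    dB.items = dA.items.map (fun p => (p.1, pvRel p.2))

lemma pvGetB (dA : PySem.Dict Int (List pvHit)) (dB : PySem.Dict Int (pvHit × Bool))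
    (h : dB.items = dA.items.map (fun p => (p.1, pvRel p.2))) (k : Int) :
    dB.get? k = (dA.get? k).map pvRel := by
  simp only [PySem.Dict.get?, h, List.find?_map]
  rcases hf : dA.items.find? (fun p => p.1 == k) with _ | p
  · have : dA.items.find? ((fun p => p.1 == k) ∘ (fun p : Int × List pvHit => (p.1, pvRel p.2))) = none := by
      simpa [Function.comp] using hf
    simp [this, hf]
  · have : dA.items.find? ((fun p => p.1 == k) ∘ (fun p : Int × List pvHit => (p.1, pvRel p.2))) = some p := by
      simpa [Function.comp] using hf
    simp [this, hf]

lemma pvRel_append (l : List pvHit) (hne : l ≠ []) (x : pvHit) :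
    pvRel (l ++ [x]) = ((pvRel l).1, (pvRel l).2 || (x.2.2.2.2 != (pvRel l).1.2.2.2.2)) := by
  cases l with
  | nil => exact absurd rfl hne
  | cons h t => simp [pvRel, List.any_append]

lemma pvInv_step (dA : PySem.Dict Int (List pvHit)) (dB : PySem.Dict Int (pvHit × Bool))
    (h : pvInv dA dB) (x : pvHit) : pvInv (pvStepA dA x) (pvStepB dB x) := by
  obtain ⟨hnd, hmem, hrel⟩ := h
  have hget := pvGetB dA dB hrel x.1
  rcases hA : dA.get? x.1 with _ | l
  · -- position not seen yet: both sides append a fresh entry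
    have hcA : dA.contains x.1 = false := by
      rw [PySem.Dict.contains_eq_isSome_get?, hA]; rfl
    have hB : dB.get? x.1 = none := by rw [hget, hA]; rfl
    have hcB : dB.contains x.1 = false := by
      rw [PySem.Dict.contains_eq_isSome_get?, hB]; rfl
    have hitemsA : (pvStepA dA x).items = dA.items ++ [(x.1, [x])] := by
      simp [pvStepA, PySem.Dict.getD_of_not_contains _ _ hcA,
        PySem.Dict.items_insert_of_not_contains _ _ hcA]
    have hitemsB : (pvStepB dB x).items = dB.items ++ [(x.1, (x, false))] := by
      simp only [pvStepB, hB]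
      exact PySem.Dict.items_insert_of_not_contains _ _ hcB
    refine ⟨?_, ?_, ?_⟩
    · simpa [pvStepA] using PySem.Dict.nodup_keys_insert _ _ _ hnd
    · intro p hp
      rw [hitemsA] at hp
      rcases List.mem_append.mp hp with hp | hp
      · exact hmem p hp
      · simp only [List.mem_singleton] at hp
        subst hp; exact ⟨by simp, by simp⟩
    · rw [hitemsA, hitemsB, List.map_append, hrel]
      simp [pvRel]
  · -- position already present with evidence list l
    have hcA : dA.contains x.1 = true := by
      rw [PySem.Dict.contains_eq_isSome_get?, hA]; rfl
    have hB : dB.get? x.1 = some (pvRel l) := by rw [hget, hA]; rfl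
    have hcB : dB.contains x.1 = true := by
      rw [PySem.Dict.contains_eq_isSome_get?, hB]; rfl
    have hmemA : (x.1, l) ∈ dA.items := PySem.Dict.mem_items_of_get?_eq_some _ hA
    obtain ⟨hlne, hlhd⟩ := hmem (x.1, l) hmemA
    have hgd : dA.getD x.1 [] = l := PySem.Dict.getD_of_get?_eq_some _ _ hA
    have hitemsA : (pvStepA dA x).items =
        dA.items.map (fun p => if p.1 == x.1 then (x.1, l ++ [x]) else p) := by
      simp [pvStepA, hgd, PySem.Dict.items_insert_of_contains _ _ hcA]
    -- any item whose key is x.1 is exactly (x.1, l)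
    have hkey : ∀ p ∈ dA.items, (p.1 == x.1) = true → p = (x.1, l) := by
      intro p hp hpk
      have hpk' : p.1 = x.1 := by simpa using hpk
      have := PySem.Dict.get?_of_mem_items dA (k := p.1) (v := p.2) (by simpa using hp) hnd
      rw [hpk', hA] at this
      have : p.2 = l := by simpa using this.symm
      calc p = (p.1, p.2) := rfl
        _ = (x.1, l) := by rw [hpk', this]
    have hrelapp := pvRel_append l hlne x
    refine ⟨?_, ?_, ?_⟩
    · simpa [pvStepA] using PySem.Dict.nodup_keys_insert _ _ _ hnd
    · intro p hp
      rw [hitemsA] at hp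
      obtain ⟨q, hq, hpq⟩ := List.mem_map.mp hp
      by_cases hqk : (q.1 == x.1) = true
      · simp only [hqk, if_true] at hpq
        subst hpq
        refine ⟨by simp, ?_⟩
        have : (l ++ [x]).headI = l.headI := by
          cases l with | nil => exact absurd rfl hlne | cons a t => rfl
        simp [this, hlhd]
      · simp only [hqk] at hpq
        subst hpq; exact hmem q hq
    · rw [hitemsA]
      simp only [pvStepB, hB]
      by_cases hcond : (!(pvRel l).2 && (x.2.2.2.2 != (pvRel l).1.2.2.2.2)) = true
      · rw [if_pos hcond]
        rw [PySem.Dict.items_insert_of_contains _ _ hcB, hrel, List.map_map, List.map_map]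
        refine List.map_congr_left (fun p hp => ?_)
        by_cases hpk : (p.1 == x.1) = true
        · have hpeq := hkey p hp hpk
          subst hpeq
          simp only [Function.comp, hpk, if_true, hrelapp]
          have hc : (pvRel l).2 = false := by
            rcases hc2 : (pvRel l).2 with _ | _
            · rfl
            · rw [hc2] at hcond; simp at hcond
          have hmm : (x.2.2.2.2 != (pvRel l).1.2.2.2.2) = true := by
            rcases hm2 : (x.2.2.2.2 != (pvRel l).1.2.2.2.2) with _ | _
            · rw [hm2] at hcond; simp at hcond
            · rfl
          simp [hc, hmm]
        · simp [Function.comp, hpk]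
      · rw [if_neg hcond, hrel, List.map_map]
        refine List.map_congr_left (fun p hp => ?_)
        by_cases hpk : (p.1 == x.1) = true
        · have hpeq := hkey p hp hpk
          subst hpeq
          simp only [Function.comp, hpk, if_true, hrelapp]
          have hor : ((pvRel l).2 || (x.2.2.2.2 != (pvRel l).1.2.2.2.2)) = (pvRel l).2 := by
            rcases hc2 : (pvRel l).2 with _ | _
            · rcases hm2 : (x.2.2.2.2 != (pvRel l).1.2.2.2.2) with _ | _
              · rfl
              · exfalso; apply hcond; rw [hc2, hm2]; rfl
            · rfl
          simp [hor]
        · simp [Function.comp, hpk]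

lemma pvInv_fold (L : List pvHit) (dA : PySem.Dict Int (List pvHit)) (dB : PySem.Dict Int (pvHit × Bool))
    (h : pvInv dA dB) : pvInv (L.foldl pvStepA dA) (L.foldl pvStepB dB) := by
  induction L generalizing dA dB with
  | nil => exact h
  | cons x t ih => exact ih _ _ (pvInv_step _ _ h x)

-- the per-position value A emits
def pvCallA (p : Int × List pvHit) : pvHit :=
  if p.2.length == 1 then p.2.headI
  else
    if (PySem.Set.ofList (p.2.map (fun e => e.2.2.2.2))).length == 1 then
      (p.1, p.2.headI.2.1, p.2.headI.2.2.1, p.2.headI.2.2.2.1,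
        (PySem.Set.ofList (p.2.map (fun e => e.2.2.2.2))).headI)
    else (p.1, p.2.headI.2.1, p.2.headI.2.2.1, "CONFLICT", "other")

-- the per-position value B emits
def pvCallB (fc : pvHit × Bool) : pvHit :=
  if fc.2 then (fc.1.1, fc.1.2.1, fc.1.2.2.1, "CONFLICT", "other") else fc.1

lemma pvMergeA_eq (m : List pvHit) (p : Int × List pvHit) : pvMergeA m p = m ++ [pvCallA p] := by
  simp only [pvMergeA, pvCallA]; split_ifs <;> rfl

lemma pvEmitB_eq (m : List pvHit) (fc : pvHit × Bool) : pvEmitB m fc = m ++ [pvCallB fc] := by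
  simp only [pvEmitB, pvCallB]; split_ifs <;> rfl

lemma pvFold_append {α β : Type} (l : List α) (f : α → β) (g : List β → α → List β)
    (hg : ∀ m x, g m x = m ++ [f x]) (acc : List β) :
    l.foldl g acc = acc ++ l.map f := by
  induction l generalizing acc with
  | nil => simp
  | cons x t ih => simp [hg, ih, List.append_assoc]

lemma pvSet_fold_const (a : String) : ∀ (xs : List String), (∀ x ∈ xs, x = a) →
    xs.foldl PySem.Set.add [a] = [a] := by
  intro xs h
  induction xs with
  | nil => rfl
  | cons x t ih =>
      have hx : x = a := h x (by simp)
      have : PySem.Set.add [a] x = [a] := by simp [PySem.Set.add, PySem.Set.contains, hx]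
      simp only [List.foldl_cons, this]
      exact ih (fun y hy => h y (by simp [hy]))

lemma pvSet_all_eq (a : String) (xs : List String) (hne : xs ≠ []) (h : ∀ x ∈ xs, x = a) :
    PySem.Set.ofList xs = [a] := by
  cases xs with
  | nil => exact absurd rfl hne
  | cons x t =>
      have hx : x = a := h x (by simp)
      simp only [PySem.Set.ofList, List.foldl_cons, hx]
      exact pvSet_fold_const a t (fun y hy => h y (by simp [hy]))

lemma pvSet_two_mem {x y : String} {xs : List String} (hx : x ∈ PySem.Set.ofList xs)
    (hy : y ∈ PySem.Set.ofList xs) (hxy : x ≠ y) :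
    ((PySem.Set.ofList xs).length == 1) = false := by
  rcases hlen : (PySem.Set.ofList xs).length == 1 with _ | _
  · rfl
  · exfalso
    obtain ⟨z, hz⟩ := List.length_eq_one_iff.mp (by simpa using hlen)
    rw [hz] at hx hy
    simp only [List.mem_singleton] at hx hy
    exact hxy (hx.trans hy.symm)

lemma pvCall_eq (p : Int × List pvHit) (hne : p.2 ≠ []) (hhd : p.2.headI.1 = p.1) :
    pvCallA p = pvCallB (pvRel p.2) := by
  obtain ⟨k, l⟩ := p
  cases l with
  | nil => exact absurd rfl hne
  | cons h t =>
    obtain ⟨k1, r, al, b, asg⟩ := h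
    simp only [List.headI_cons] at hhd
    cases t with
    | nil => simp [pvCallA, pvCallB, pvRel, hhd]
    | cons h2 t' =>
      by_cases hall : ∀ e ∈ h2 :: t', e.2.2.2.2 = asg
      · have hset : PySem.Set.ofList (((k1,r,al,b,asg) :: h2 :: t').map (fun e => e.2.2.2.2)) = [asg] := by
          apply pvSet_all_eq
          · simp
          · intro x hx
            simp only [List.mem_map] at hx
            obtain ⟨e, he, hxe⟩ := hx
            rcases List.mem_cons.mp he with rfl | he'
            · exact hxe ▸ rfl
            · rw [← hxe]; exact hall e he'
        have hany : ((h2 :: t').any (fun e => e.2.2.2.2 != asg)) = false :=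
          List.any_eq_false.mpr (fun e he => by simp [hall e he])
        simp only [List.map_cons] at hset
        simp [pvCallA, pvCallB, pvRel, hset, hhd, List.any_cons, hany]
      · push Not at hall
        obtain ⟨e, he, hea⟩ := hall
        have hm1 : asg ∈ PySem.Set.ofList (((k1,r,al,b,asg) :: h2 :: t').map (fun e => e.2.2.2.2)) := by
          rw [PySem.Set.mem_ofList]; exact List.mem_map.mpr ⟨(k1,r,al,b,asg), by simp, rfl⟩
        have hm2 : e.2.2.2.2 ∈ PySem.Set.ofList (((k1,r,al,b,asg) :: h2 :: t').map (fun e => e.2.2.2.2)) := by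
          rw [PySem.Set.mem_ofList]; exact List.mem_map.mpr ⟨e, by simp [he], rfl⟩
        have hset := pvSet_two_mem hm1 hm2 (Ne.symm hea)
        simp only [List.map_cons] at hset
        have hany : ((h2 :: t').any (fun e => e.2.2.2.2 != asg)) = true :=
          List.any_eq_true.mpr ⟨e, he, by simpa using hea⟩
        simp [pvCallA, pvCallB, pvRel, hhd, hset, List.any_cons, hany]

theorem pv_main : ∀ (hits1 hits2 : List pvHit),
    merge_fragment_snp_evidence hits1 hits2 = merge_fragment_snp_evidence_alt hits1 hits2 := by
  intro hits1 hits2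
  have hinv : pvInv ((hits1 ++ hits2).foldl pvStepA PySem.Dict.empty)
      ((hits1 ++ hits2).foldl pvStepB PySem.Dict.empty) := by
    refine pvInv_fold _ _ _ ⟨?_, ?_, ?_⟩ <;> simp [PySem.Dict.empty]
  obtain ⟨hnd, hmem, hrel⟩ := hinv
  simp only [merge_fragment_snp_evidence, merge_fragment_snp_evidence_alt]
  rw [pvFold_append _ pvCallA pvMergeA pvMergeA_eq, pvFold_append _ pvCallB pvEmitB pvEmitB_eq]
  simp only [List.nil_append, PySem.Dict.values, hrel, List.map_map]
  exact List.map_congr_left (fun p hp => pvCall_eq p (hmem p hp).1 (hmem p hp).2)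

-- ===== VERDICT (by name: the statement is the Claim_ definition above) =====
theorem merge_fragment_snp_evidence_spec : Claim_equal_merge_fragment_snp_evidence := by
  intro hits1 hits2 _
  unfold Spec_merge_fragment_snp_evidence
  exact pv_main hits1 hits2
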